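-- pv_equiv track=rewrite | github.com/MarinaDaumas/mat_comp | sincrono/AS2.py | sum67
-- ===== SOURCE A (Python) =====
-- def sum67(nums):
--     sum = 0
--     last_was_6 = False
--
--     for item in nums:
--         if item == 6:
--             last_was_6 = True
--         else:
--             pass
--
--         if not last_was_6:
--             sum += item
--
--         elif item == 7:
--             last_was_6 = False
--
--     return sum
-- ===== SOURCE B (Python) =====
-- def sum67(nums):
--     total = 0
--     i = 0
--     n = len(nums)
--     while i < n:
--         if nums[i] == 6:
--             i += 1
--             while i < n and nums[i] != 7:
--                 i += 1
--             i += 1  # consume the terminating 7 (or fall off the end)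
--         else:
--             total += nums[i]
--             i += 1
--     return total
-- ===== Notes on version B (the rewrite author's own statement) =====
-- stated objective: alternative
-- what changed: Replaced the carried last_was_6 boolean with an index-driven skip-run scan: an outer loop adds items, and on a 6 an inner loop advances past the next 7 (or the end), so no flag state is threaded through the pass.
import Mathlib
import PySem

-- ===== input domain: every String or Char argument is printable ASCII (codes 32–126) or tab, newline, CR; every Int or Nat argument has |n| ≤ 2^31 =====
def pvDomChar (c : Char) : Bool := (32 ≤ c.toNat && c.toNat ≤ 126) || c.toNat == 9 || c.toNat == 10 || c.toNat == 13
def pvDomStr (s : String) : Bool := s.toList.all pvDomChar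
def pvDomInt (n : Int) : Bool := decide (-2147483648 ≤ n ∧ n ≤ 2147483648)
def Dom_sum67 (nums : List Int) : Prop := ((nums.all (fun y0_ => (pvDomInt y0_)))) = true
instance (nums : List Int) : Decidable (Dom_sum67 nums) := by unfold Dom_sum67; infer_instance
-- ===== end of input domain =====

-- B replaces A's carried last_was_6 flag with an outer scan plus an inner skip loop (an "alternative" decomposition, same cost).


-- ===== PORT A =====
-- fold over (sum, last_was_6), branches in A's order
def sum67Step (st : Int × Bool) (item : Int) : Int × Bool :=
  let last := if item = 6 then true else st.2
  if !last then (st.1 + item, last)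
  else if item = 7 then (st.1, false)
  else (st.1, last)

def sum67 (nums : List Int) : Int :=
  (nums.foldl sum67Step (0, false)).1

-- ===== PORT B =====
-- inner while loop: advance until just past the next 7 (or the end)
def sum67SkipTo7 : List Int → List Int
  | [] => []
  | x :: xs => if x = 7 then xs else sum67SkipTo7 xs

theorem sum67SkipTo7_length_le : ∀ (xs : List Int), (sum67SkipTo7 xs).length ≤ xs.length
  | [] => Nat.le_refl _
  | x :: xs => by
      simp only [sum67SkipTo7]
      split
      · exact Nat.le_succ _
      · exact Nat.le_trans (sum67SkipTo7_length_le xs) (Nat.le_succ _)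

-- outer while loop over the remaining list
def sum67_alt : List Int → Int
  | [] => 0
  | x :: xs =>
      if x = 6 then sum67_alt (sum67SkipTo7 xs)
      else x + sum67_alt xs
  termination_by xs => xs.length
  decreasing_by
  · exact Nat.lt_succ_of_le (sum67SkipTo7_length_le xs)
  · exact Nat.lt_succ_self _

-- ===== PRECONDITION & SPEC =====
def Spec_sum67 (nums : List Int) (out : Int) : Prop := out = sum67_alt nums
instance (nums : List Int) (out : Int) : Decidable (Spec_sum67 nums out) := by unfold Spec_sum67; infer_instance

-- ===== CLAIM (what is proved, stated in full; the proofs are below) =====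
def Claim_equal_sum67 : Prop := ∀ (nums : List Int), Dom_sum67 nums → Spec_sum67 nums (sum67 nums)

-- ===== LEMMAS AND PROOFS =====

theorem sum67_foldl_eq (nums : List Int) : ∀ (s : Int) (b : Bool),
    (nums.foldl sum67Step (s, b)).1
    = s + (if b then sum67_alt (sum67SkipTo7 nums) else sum67_alt nums) := by
  induction nums with
  | nil => intro s b; cases b <;> simp [sum67_alt, sum67SkipTo7]
  | cons x xs ih =>
      intro s b
      cases b with
      | false =>
          by_cases h6 : x = 6
          · subst h6
            have hstep : sum67Step (s, false) 6 = (s, true) := by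
              simp [sum67Step]
            simp only [List.foldl, hstep, ih]
            rw [sum67_alt]
            simp
          · have hstep : sum67Step (s, false) x = (s + x, false) := by
              simp [sum67Step, h6]
            simp only [List.foldl, hstep, ih]
            rw [sum67_alt]
            simp [h6, add_assoc]
      | true =>
          by_cases h7 : x = 7
          · subst h7
            have hstep : sum67Step (s, true) 7 = (s, false) := by
              simp [sum67Step]
            simp only [List.foldl, hstep, ih]
            simp [sum67SkipTo7]
          · have hstep : sum67Step (s, true) x = (s, true) := by
              simp only [sum67Step]
              split <;> simp
            simp only [List.foldl, hstep, ih]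
            simp [sum67SkipTo7, h7]

-- ===== VERDICT (by name: the statement is the Claim_ definition above) =====
theorem sum67_spec : Claim_equal_sum67 := by
  intro nums _
  unfold Spec_sum67 sum67
  rw [sum67_foldl_eq]
  simp
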